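-- pv_equiv track=rewrite | github.com/sandhaka/learning-path | dynamic_programming/construct/how_construct.py | how_construct
-- ===== SOURCE A (Python) =====
-- def how_construct(target, word_bank, memo=None):
--     if len(target) == 0:
--         return []  # Solution reached
--     if memo is None:
--         memo = {}
--     elif target in memo.keys():
--         return memo[target]
--     for w in word_bank:
--         if target.startswith(w):
--             new_target = target.removeprefix(w)
--             seq = how_construct(new_target, word_bank, memo)
--             if seq is not None:
--                 memo[target] = [w] + seq
--                 return memo[target]
--     memo[target] = None
--     return None
-- ===== SOURCE B (Python) =====
-- def how_construct(target, word_bank, memo=None):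
--     # Iterative bottom-up DP over suffix start positions (equivalence is about the
--     # return value only: unlike the original, this does not write into a caller-supplied memo).
--     n = len(target)
--     table = [None] * n + [[]]  # table[i] = a construction of target[i:], or None
--     for i in range(n - 1, -1, -1):
--         s = target[i:]
--         if memo is not None and s in memo:
--             table[i] = memo[s]
--             continue
--         for w in word_bank:
--             if target.startswith(w, i):
--                 tail = table[i + len(w)]  # for w == "" this reads table[i], still None
--                 if tail is not None:
--                     table[i] = [w] + tail
--                     break
--     return table[0]
-- ===== Notes on version B (the rewrite author's own statement) =====
-- stated objective: alternative
-- what changed: Replaces top-down memoized recursion with an iterative bottom-up DP: a table over suffix start positions is filled from the end of the target, each entry taking the first word (in bank order) whose suffix entry is already solved, with caller-supplied memo entries honoured per suffix; only the return value is matched (B does not mutate a caller-supplied memo).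
-- outside the precondition, e.g. on how_construct('ab', ['a', 'b', ''], None): A returns ['a', 'b'], B returns ['a', 'b']
import Mathlib
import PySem

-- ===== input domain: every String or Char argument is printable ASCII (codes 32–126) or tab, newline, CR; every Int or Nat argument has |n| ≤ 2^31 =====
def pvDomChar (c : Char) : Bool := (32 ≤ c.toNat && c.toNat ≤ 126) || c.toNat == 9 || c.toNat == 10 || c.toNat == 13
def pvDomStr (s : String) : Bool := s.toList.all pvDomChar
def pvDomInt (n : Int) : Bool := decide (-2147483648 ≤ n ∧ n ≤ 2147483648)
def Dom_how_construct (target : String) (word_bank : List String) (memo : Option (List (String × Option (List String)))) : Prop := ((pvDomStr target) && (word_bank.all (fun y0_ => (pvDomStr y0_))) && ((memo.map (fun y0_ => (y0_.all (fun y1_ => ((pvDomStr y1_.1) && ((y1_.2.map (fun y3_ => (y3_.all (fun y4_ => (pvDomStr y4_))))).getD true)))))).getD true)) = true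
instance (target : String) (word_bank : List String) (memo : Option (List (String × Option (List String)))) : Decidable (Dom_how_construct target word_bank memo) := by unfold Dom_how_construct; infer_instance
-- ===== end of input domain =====

-- B rebuilds the construction by an iterative bottom-up DP over suffix start positions instead of
-- A's memoized top-down recursion (objective: alternative). Equivalence is about the RETURN value
-- only: A writes into a caller-supplied memo dict, B does not.

-- ===== PORT A =====
-- A's recursion is ported with an explicit recursion-depth fuel; the fuel guard only makes the
-- recursion total (under Pre_ every matched word is nonempty, so depth < len(target)+1 and the
-- guard is never reached).  `target.removeprefix(w)` after a successful `startswith(w)` is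
-- exactly the slice target[len(w):], ported with PySem.Str.slice.
mutual
def howConstructGo (fuel : Nat) (target : String) (word_bank : List String)
    (memo : PySem.Dict String (Option (List String))) :
    Option (List String) × PySem.Dict String (Option (List String)) :=
  match fuel with
  | 0 => (none, memo)   -- Python diverges past this depth; unreachable under Pre_
  | fuel + 1 =>
    if PySem.Str.len target == 0 then (some [], memo)
    else
      match memo.get? target with
      | some v => (v, memo)
      | none => howConstructScan fuel target word_bank word_bank memo
termination_by (fuel, 0)

def howConstructScan (fuel : Nat) (target : String) (word_bank : List String)
    (ws : List String) (memo : PySem.Dict String (Option (List String))) :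
    Option (List String) × PySem.Dict String (Option (List String)) :=
  match ws with
  | [] => (none, memo.insert target none)
  | w :: rest =>
    if PySem.Str.startswith target w then
      let new_target := PySem.Str.slice target (some (PySem.Str.len w)) none
      match howConstructGo fuel new_target word_bank memo with
      | (some seq, m') => (some (w :: seq), m'.insert target (some (w :: seq)))
      | (none, m') => howConstructScan fuel target word_bank rest m'
    else howConstructScan fuel target word_bank rest memo
termination_by (fuel, ws.length + 1)
end

def how_construct (target : String) (word_bank : List String)
    (memo : Option (List (String × Option (List String)))) : Option (List String) :=
  -- `memo=None` becomes a fresh empty dict, as in A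
  (howConstructGo (target.toList.length + 1) target word_bank
    (PySem.Dict.ofList (memo.getD []))).1

-- ===== PORT B =====
-- the inner `for w in word_bank` scan of Source B at position i; `table` here is the Python array
-- viewed from slot i onward, i.e. its head is the in-progress entry table[i] (still None, as in
-- Source B) followed by the already-filled entries for i+1 … n, so Python's `table[i + len(w)]` is
-- `table[len(w)]?` here (for w = "" that reads the head None, exactly as Source B reads table[i])
def howConstructAltScan (ws : List String) (table : List (Option (List String)))
    (s : List Char) : Option (List String) :=
  match ws with
  | [] => none
  | w :: rest =>
    if PySem.Chars.startswith s w.toList then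
      match table[w.toList.length]? with
      | some (some tail) => some (w :: tail)
      | _ => howConstructAltScan rest table s
    else howConstructAltScan rest table s

-- Source B's descending loop `for i in range(n-1,-1,-1)` filling table[i] from table[i+1..], ported
-- as structural recursion over the suffix's characters (position i ↔ the suffix target[i:])
def howConstructAltTable (word_bank : List String)
    (memo : Option (PySem.Dict String (Option (List String)))) :
    List Char → List (Option (List String))
  | [] => [some []]
  | c :: rest =>
    let table := howConstructAltTable word_bank memo rest
    let v :=
      match memo with
      | some m =>
        match m.get? (String.ofList (c :: rest)) with
        | some v => v
        | none => howConstructAltScan word_bank (none :: table) (c :: rest)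
      | none => howConstructAltScan word_bank (none :: table) (c :: rest)
    v :: table

def how_construct_alt (target : String) (word_bank : List String)
    (memo : Option (List (String × Option (List String)))) : Option (List String) :=
  (howConstructAltTable word_bank (memo.map PySem.Dict.ofList) target.toList).headD none

-- ===== PRECONDITION & SPEC =====
-- Pre_ excludes banks containing the empty string (on a nonempty target with no memo entry for
-- the target itself): there A recurses forever and raises RecursionError as soon as its scan
-- actually reaches the empty word; on those excluded inputs where A still returns (an earlier
-- word succeeds at every suffix A visits, so "" is never tried) B returns the same value — see
-- the cite — but no closed-form condition separates them from the raising ones without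
-- re-simulating A's search.
def Pre_how_construct (target : String) (word_bank : List String)
    (memo : Option (List (String × Option (List String)))) : Prop :=
  "" ∉ word_bank ∨ target = "" ∨
    (PySem.Dict.ofList (memo.getD [])).contains target = true
instance (target : String) (word_bank : List String) (memo : Option (List (String × Option (List String)))) : Decidable (Pre_how_construct target word_bank memo) := by unfold Pre_how_construct; infer_instance

def pvWitness_how_construct : String × List String × (Option (List (String × Option (List String)))) :=
  ("purple", ["purp", "p", "ur", "le", "purpl"], none)

def Spec_how_construct (target : String) (word_bank : List String) (memo : Option (List (String × Option (List String)))) (out : Option (List String)) : Prop := out = how_construct_alt target word_bank memo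
instance (target : String) (word_bank : List String) (memo : Option (List (String × Option (List String)))) (out : Option (List String)) : Decidable (Spec_how_construct target word_bank memo out) := by unfold Spec_how_construct; infer_instance

-- ===== CLAIM (what is proved, stated in full; the proofs are below) =====
def Claim_equal_how_construct : Prop := ∀ (target : String) (word_bank : List String) (memo : Option (List (String × Option (List String)))), Dom_how_construct target word_bank memo → Pre_how_construct target word_bank memo → Spec_how_construct target word_bank memo (how_construct target word_bank memo)

-- ===== LEMMAS AND PROOFS =====

-- B's value on a suffix: the head of the table built for it
def hB (word_bank : List String) (memo : Option (PySem.Dict String (Option (List String))))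
    (l : List Char) : Option (List String) :=
  (howConstructAltTable word_bank memo l).headD none

-- the caller-supplied memo, looked up
def lookup0 (memo : Option (PySem.Dict String (Option (List String)))) (k : String) :
    Option (Option (List String)) :=
  memo.bind (fun d => d.get? k)

-- invariant carried by A's threaded memo dict `m`
def GoodM (word_bank : List String) (memo : Option (PySem.Dict String (Option (List String))))
    (m : PySem.Dict String (Option (List String))) : Prop :=
  (∀ k v, lookup0 memo k = some v → m.get? k = some v) ∧
  (∀ k v, m.get? k = some v → k.toList ≠ [] → v = hB word_bank memo k.toList)

theorem hB_nil (word_bank : List String) (memo : Option (PySem.Dict String (Option (List String)))) :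
    hB word_bank memo [] = some [] := rfl

theorem hB_cons (word_bank : List String) (memo : Option (PySem.Dict String (Option (List String))))
    (c : Char) (rest : List Char) :
    hB word_bank memo (c :: rest) =
      match lookup0 memo (String.ofList (c :: rest)) with
      | some v => v
      | none => howConstructAltScan word_bank (none :: howConstructAltTable word_bank memo rest) (c :: rest) := by
  cases memo <;> simp [hB, howConstructAltTable, lookup0]

theorem table_get (word_bank : List String) (memo : Option (PySem.Dict String (Option (List String))))
    (l : List Char) (k : Nat) (hk : k ≤ l.length) :
    (howConstructAltTable word_bank memo l)[k]? = some (hB word_bank memo (l.drop k)) := by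
  induction l generalizing k with
  | nil =>
    have hk0 : k = 0 := by simpa using hk
    subst hk0
    rfl
  | cons c rest ih =>
    cases k with
    | zero => simp [howConstructAltTable, hB]
    | succ k =>
      simp only [howConstructAltTable, List.getElem?_cons_succ, List.drop_succ_cons]
      exact ih k (by simpa using hk)

theorem string_eq_empty_of_toList_nil (s : String) (h : s.toList = []) : s = "" := by
  have := String.ofList_toList (s := s)
  rw [h] at this
  simpa using this.symm

theorem goodM_insert (word_bank : List String)
    (memo : Option (PySem.Dict String (Option (List String))))
    (m : PySem.Dict String (Option (List String))) (key : String) (v : Option (List String))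
    (hm : GoodM word_bank memo m) (hk : key.toList ≠ [])
    (hv : v = hB word_bank memo key.toList) :
    GoodM word_bank memo (m.insert key v) := by
  obtain ⟨h1, h2⟩ := hm
  constructor
  · intro k' v' hl
    by_cases hne : k' = key
    · subst hne
      -- a memo0 entry for k' forces hB k'.toList = v', so the inserted value is v'
      have hhB : hB word_bank memo k'.toList = v' := by
        obtain ⟨c, rest, hcr⟩ : ∃ c rest, k'.toList = c :: rest := by
          cases hcl : k'.toList with
          | nil => exact absurd hcl hk
          | cons c rest => exact ⟨c, rest, rfl⟩
        rw [hcr, hB_cons, ← hcr, String.ofList_toList, hl]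
      rw [PySem.Dict.get?_insert_self, hv, hhB]
    · rw [PySem.Dict.get?_insert_of_ne _ _ hne]
      exact h1 k' v' hl
  · intro k' v' hl hk'
    by_cases hne : k' = key
    · subst hne
      rw [PySem.Dict.get?_insert_self] at hl
      cases hl
      exact hv
    · rw [PySem.Dict.get?_insert_of_ne _ _ hne] at hl
      exact h2 k' v' hl hk'

theorem toList_ne_nil_of_ne_empty (w : String) (h : w ≠ "") : w.toList ≠ [] :=
  fun hl => h (string_eq_empty_of_toList_nil w hl)

theorem new_target_toList (t w : String) :
    (PySem.Str.slice t (some (PySem.Str.len w)) none).toList = t.toList.drop w.toList.length := by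
  simp [PySem.Str.toList_slice, PySem.Str.len_eq, PySem.Chars.slice_eq_listSlice,
    PySem.List.slice_from_natCast]

theorem cons_tail_get (tbl : List (Option (List String))) (n : Nat) (h : 1 ≤ n) :
    (none :: tbl)[n]? = tbl[n - 1]? := by
  cases n with
  | zero => omega
  | succ n => simp

theorem tail_drop_pred (l : List Char) (n : Nat) (h : 1 ≤ n) :
    l.tail.drop (n - 1) = l.drop n := by
  rw [← List.drop_one, List.drop_drop]
  congr 1
  omega

theorem scan_correct (word_bank : List String)
    (memo : Option (PySem.Dict String (Option (List String)))) (fuel : Nat)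
    (IH : ∀ (t : String) m, t.toList.length < fuel → GoodM word_bank memo m →
      (howConstructGo fuel t word_bank m).1 = hB word_bank memo t.toList ∧
      GoodM word_bank memo (howConstructGo fuel t word_bank m).2) :
    ∀ (ws : List String) (target : String) m, "" ∉ ws →
      target.toList ≠ [] → target.toList.length < fuel + 1 →
      GoodM word_bank memo m →
      hB word_bank memo target.toList =
        howConstructAltScan ws (none :: howConstructAltTable word_bank memo target.toList.tail) target.toList →
      (howConstructScan fuel target word_bank ws m).1 = hB word_bank memo target.toList ∧
      GoodM word_bank memo (howConstructScan fuel target word_bank ws m).2 := by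
  intro ws
  induction ws with
  | nil =>
    intro target m _ htne hlen hm hBeq
    have hb0 : hB word_bank memo target.toList = none := by
      simpa [howConstructAltScan] using hBeq
    constructor
    · simp [howConstructScan, hb0]
    · simp only [howConstructScan]
      exact goodM_insert word_bank memo m target none hm htne hb0.symm
  | cons w rest ih =>
    intro target m hws htne hlen hm hBeq
    have hw0 : w ≠ "" := fun h => hws (by simp [h])
    have hrest : "" ∉ rest := fun h => hws (List.mem_cons_of_mem _ h)
    have hwl : w.toList ≠ [] := toList_ne_nil_of_ne_empty w hw0
    by_cases hsw : PySem.Str.startswith target w = true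
    · -- the word matches at this position in both programs
      have hpre : w.toList <+: target.toList := by
        rw [PySem.Str.startswith_eq] at hsw
        exact (PySem.Chars.startswith_iff _ _).mp hsw
      have hwle : w.toList.length ≤ target.toList.length := hpre.length_le
      have hw1 : 1 ≤ w.toList.length := by
        cases hcl : w.toList with
        | nil => exact absurd hcl hwl
        | cons _ _ => simp
      have hntl : (PySem.Str.slice target (some (PySem.Str.len w)) none).toList =
          target.toList.drop w.toList.length := new_target_toList target w
      have hlen' : (PySem.Str.slice target (some (PySem.Str.len w)) none).toList.length < fuel :=
        calc (PySem.Str.slice target (some (PySem.Str.len w)) none).toList.length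
            = (target.toList.drop w.toList.length).length := by rw [hntl]
          _ = target.toList.length - w.toList.length := List.length_drop
          _ < fuel := by omega
      have htab : (none :: howConstructAltTable word_bank memo target.toList.tail)[w.toList.length]? =
          some (hB word_bank memo (target.toList.drop w.toList.length)) := by
        have hkb : w.toList.length - 1 ≤ target.toList.tail.length := by
          simp only [List.length_tail]
          omega
        rw [cons_tail_get _ _ hw1,
          table_get word_bank memo target.toList.tail (w.toList.length - 1) hkb,
          tail_drop_pred _ _ hw1]
      have hcond : PySem.Chars.startswith target.toList w.toList = true := by
        rw [← PySem.Str.startswith_eq]; exact hsw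
      obtain ⟨hgo1, hgo2⟩ := IH (PySem.Str.slice target (some (PySem.Str.len w)) none) m hlen' hm
      rcases hE : howConstructGo fuel (PySem.Str.slice target (some (PySem.Str.len w)) none)
          word_bank m with ⟨r, m'⟩
      rw [hE] at hgo1 hgo2
      rw [hntl] at hgo1
      cases hcall : hB word_bank memo (target.toList.drop w.toList.length) with
      | some tl =>
        have hBval : hB word_bank memo target.toList = some (w :: tl) := by
          rw [hBeq]
          simp only [howConstructAltScan, if_pos hcond, htab, hcall]
        have hr : r = some tl := by rw [hcall] at hgo1; exact hgo1
        subst hr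
        constructor
        · simp only [howConstructScan, if_pos hsw, hE, hBval]
        · simp only [howConstructScan, if_pos hsw, hE]
          exact goodM_insert word_bank memo m' target (some (w :: tl)) hgo2 htne hBval.symm
      | none =>
        have hr : r = none := by rw [hcall] at hgo1; exact hgo1
        subst hr
        have hBeq' : hB word_bank memo target.toList =
            howConstructAltScan rest (none :: howConstructAltTable word_bank memo target.toList.tail)
              target.toList := by
          rw [hBeq]
          simp only [howConstructAltScan, if_pos hcond, htab, hcall]
        have := ih target m' hrest htne hlen hgo2 hBeq'
        simpa only [howConstructScan, if_pos hsw, hE] using this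
    · -- the word does not match: both programs move on to the next word
      have hcond : ¬ (PySem.Chars.startswith target.toList w.toList = true) := by
        rw [← PySem.Str.startswith_eq]
        exact fun h => hsw h
      have hBeq' : hB word_bank memo target.toList =
          howConstructAltScan rest (none :: howConstructAltTable word_bank memo target.toList.tail)
            target.toList := by
        rw [hBeq]
        simp only [howConstructAltScan, if_neg hcond]
      have := ih target m hrest htne hlen hm hBeq'
      simpa only [howConstructScan, if_neg hsw] using this

theorem go_correct (word_bank : List String)
    (memo : Option (PySem.Dict String (Option (List String)))) :
    ∀ (fuel : Nat) (t : String) m, "" ∉ word_bank → t.toList.length < fuel →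
      GoodM word_bank memo m →
      (howConstructGo fuel t word_bank m).1 = hB word_bank memo t.toList ∧
      GoodM word_bank memo (howConstructGo fuel t word_bank m).2 := by
  intro fuel
  induction fuel with
  | zero => intro t m _ hlen _; omega
  | succ fuel ihf =>
    intro t m hbank hlen hm
    by_cases ht : (PySem.Str.len t == 0) = true
    · have htl : t.toList = [] := by
        have h2 : t.toList.length = 0 := by simpa [PySem.Str.len_eq] using ht
        exact List.eq_nil_of_length_eq_zero h2
      have ht'' : t = "" := string_eq_empty_of_toList_nil t htl
      refine ⟨?_, ?_⟩
      · simp [howConstructGo, ht'', hB_nil]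
      · simpa [howConstructGo, ht''] using hm
    · have htne : t.toList ≠ [] := by
        intro h
        exact ht (by simp [PySem.Str.len_eq, h])
      cases hget : m.get? t with
      | some v =>
        refine ⟨?_, ?_⟩
        · simp only [howConstructGo, if_neg ht, hget]
          exact hm.2 t v hget htne
        · simpa only [howConstructGo, if_neg ht, hget] using hm
      | none =>
        have hl0 : lookup0 memo t = none := by
          cases hll : lookup0 memo t with
          | none => rfl
          | some u => exact absurd (hm.1 t u hll) (by simp [hget])
        have hBeq : hB word_bank memo t.toList =
            howConstructAltScan word_bank (none :: howConstructAltTable word_bank memo t.toList.tail)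
              t.toList := by
          obtain ⟨c, restl, hcr⟩ : ∃ c restl, t.toList = c :: restl := by
            cases hcl : t.toList with
            | nil => exact absurd hcl htne
            | cons c restl => exact ⟨c, restl, rfl⟩
          rw [hcr, hB_cons, ← hcr, String.ofList_toList, hl0, hcr]
          simp
        have hscan := scan_correct word_bank memo fuel
          (fun t' m' hl' hg' => ihf t' m' hbank hl' hg')
          word_bank t m hbank htne (by omega) hm hBeq
        simpa only [howConstructGo, if_neg ht, hget] using hscan

theorem goodM_init (word_bank : List String)
    (memo : Option (List (String × Option (List String)))) :
    GoodM word_bank (memo.map PySem.Dict.ofList) (PySem.Dict.ofList (memo.getD [])) := by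
  cases memo with
  | none =>
    constructor
    · intro k v h
      simp [lookup0] at h
    · intro k v h _
      simp only [Option.getD_none] at h
      rw [show (PySem.Dict.ofList ([] : List (String × Option (List String)))) =
        PySem.Dict.empty from rfl, PySem.Dict.get?_empty] at h
      cases h
  | some lst =>
    constructor
    · intro k v h
      simpa [lookup0] using h
    · intro k v h hk
      obtain ⟨c, restl, hcr⟩ : ∃ c restl, k.toList = c :: restl := by
        cases hcl : k.toList with
        | nil => exact absurd hcl hk
        | cons c restl => exact ⟨c, restl, rfl⟩
      have hl : lookup0 (Option.map PySem.Dict.ofList (some lst)) k = some v := by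
        simpa [lookup0] using h
      rw [hcr, hB_cons, ← hcr, String.ofList_toList, hl]

theorem toList_ne_nil_of_ne_empty' (t : String) (h : t ≠ "") : t.toList ≠ [] :=
  fun hl => h (string_eq_empty_of_toList_nil t hl)

-- ===== VERDICT (by name: the statement is the Claim_ definition above) =====
theorem how_construct_spec : Claim_equal_how_construct := by
  intro target word_bank memo _ hpre
  unfold Spec_how_construct
  by_cases ht0 : target = ""
  · -- empty target: both return some [] before looking at the bank or the memo
    subst ht0
    unfold how_construct how_construct_alt
    simp [howConstructGo, howConstructAltTable]
  · have htne : target.toList ≠ [] := toList_ne_nil_of_ne_empty' target ht0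
    have htF : (PySem.Str.len target == 0) = false := by
      simpa [PySem.Str.len_eq] using ht0
    by_cases hmem : (PySem.Dict.ofList (memo.getD [])).contains target = true
    · -- memo hit on the target itself: A returns the memo entry at once, B reads it at i = 0
      cases memo with
      | none =>
        rw [show (PySem.Dict.ofList ((none : Option (List (String × Option (List String)))).getD []))
            = PySem.Dict.empty from rfl, PySem.Dict.contains_empty] at hmem
        cases hmem
      | some lst =>
        have hsome : ((PySem.Dict.ofList lst).get? target).isSome := by
          rw [← PySem.Dict.contains_eq_isSome_get?]
          exact hmem
        obtain ⟨v, hget⟩ := Option.isSome_iff_exists.mp hsome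
        have hA : how_construct target word_bank (some lst) = v := by
          unfold how_construct
          simp only [howConstructGo, htF, Bool.false_eq_true, if_false, Option.getD_some, hget]
        have hB : how_construct_alt target word_bank (some lst) = v := by
          obtain ⟨c, restl, hcr⟩ : ∃ c restl, target.toList = c :: restl := by
            cases hcl : target.toList with
            | nil => exact absurd hcl htne
            | cons c restl => exact ⟨c, restl, rfl⟩
          have : hB word_bank (some (PySem.Dict.ofList lst)) target.toList = v := by
            rw [hcr, hB_cons, ← hcr, String.ofList_toList]
            have hl : lookup0 (some (PySem.Dict.ofList lst)) target = some v := by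
              simpa [lookup0] using hget
            rw [hl]
          exact this
        rw [hA, hB]
    · -- the main case: the bank has no empty word
      have hbank : "" ∉ word_bank := by
        rcases hpre with h | h | h
        · exact h
        · exact absurd h ht0
        · exact absurd h hmem
      unfold how_construct how_construct_alt
      exact (go_correct word_bank (memo.map PySem.Dict.ofList) (target.toList.length + 1) target
        (PySem.Dict.ofList (memo.getD [])) hbank (by omega)
        (goodM_init word_bank memo)).1
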